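-- pv_equiv track=rewrite | github.com/PiuPiuson/shamrock-seats | bot/bot.py | divide_seats_evenly
-- ===== SOURCE A (Python) =====
-- import math
--
-- def divide_seats_evenly(seats, max_rows=4):
--     """Distribute the seats as evenly as possible across the rows."""
--     num_seats = len(seats)
--     rows = min(
--         max_rows, num_seats
--     )  # Limit to a max of 'max_rows' rows or total seat count
--
--     # Calculate the number of seats per row as evenly as possible
--     seats_per_row = [math.ceil(num_seats / rows)] * rows
--     total_seats = sum(seats_per_row)
--
--     # Adjust to ensure total seats match the number of available seats
--     if total_seats > num_seats:
--         for i in range(total_seats - num_seats):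
--             seats_per_row[-(i + 1)] -= 1
--
--     # Split the seats list into rows based on seats_per_row
--     seat_layout = []
--     start_index = 0
--     for count in seats_per_row:
--         seat_layout.append(seats[start_index : start_index + count])
--         start_index += count
--
--     return seat_layout
-- ===== SOURCE B (Python) =====
-- def divide_seats_evenly(seats, max_rows=4):
--     """Distribute the seats as evenly as possible across the rows."""
--     num_seats = len(seats)
--     rows_left = min(max_rows, num_seats)
--     layout = []
--     start = 0
--     while rows_left > 0:
--         count = -((start - num_seats) // rows_left)  # ceil of remaining / rows_left
--         layout.append(seats[start : start + count])
--         start += count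
--         rows_left -= 1
--     return layout
-- ===== Notes on version B (the rewrite author's own statement) =====
-- stated objective: simpler
-- what changed: Replaces A's three phases (build a ceil-count list, decrement its tail to fix the total, then slice by the count list) with one greedy while loop that peels off ceil(len(remaining)/rows_left) seats for each row, needing no count list and no adjustment pass.
-- outside the precondition, e.g. on divide_seats_evenly([], 4): A raises ZeroDivisionError, B returns []
-- crash fix: When min(max_rows, len(seats)) == 0 (empty seats with non-negative max_rows, or max_rows == 0) A raises ZeroDivisionError; B returns []. — e.g. on divide_seats_evenly([], 4): A raises ZeroDivisionError, B returns []
import Mathlib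
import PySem

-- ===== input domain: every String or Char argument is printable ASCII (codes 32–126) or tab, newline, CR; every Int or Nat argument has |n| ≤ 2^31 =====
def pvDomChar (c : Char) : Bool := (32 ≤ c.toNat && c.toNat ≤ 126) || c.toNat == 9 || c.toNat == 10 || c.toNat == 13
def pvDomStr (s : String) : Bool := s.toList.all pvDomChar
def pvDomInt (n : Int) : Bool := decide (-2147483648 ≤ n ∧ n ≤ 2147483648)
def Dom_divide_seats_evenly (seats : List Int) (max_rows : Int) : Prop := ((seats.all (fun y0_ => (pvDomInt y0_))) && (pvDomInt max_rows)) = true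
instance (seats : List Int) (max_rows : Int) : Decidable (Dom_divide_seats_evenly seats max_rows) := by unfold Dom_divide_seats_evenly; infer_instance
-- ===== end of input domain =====

-- B replaces A's three phases (ceil-count list, tail-decrement fix-up, slicing loop) by one
-- greedy loop that peels off ceil(len(remaining)/rows_left) seats per row (objective: simpler).

-- ===== PORT A =====
-- math.ceil(num_seats / rows) is ported as -((-num_seats) // rows): exact, since for
-- 0 ≤ num_seats ≤ 2^31 and |rows| ≤ 2^31 the float ceil of num_seats/rows equals the rational ceil.
def divide_seats_evenly (seats : List Int) (max_rows : Int) : List (List Int) :=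
  let num_seats : Int := (seats.length : Int)
  let rows : Int := min max_rows num_seats
  let c : Int := -(PySem.Int.floordiv (-num_seats) rows)
  let seats_per_row : List Int := List.replicate rows.toNat c   -- [c] * rows
  let total_seats : Int := seats_per_row.sum
  let adjusted : List Int :=
    if total_seats > num_seats then
      (PySem.List.pyRange 0 (total_seats - num_seats) 1).foldl
        (fun l i => PySem.List.pySetD l (-(i+1)) (PySem.List.pyGetD l (-(i+1)) 0 - 1)) seats_per_row
    else seats_per_row
  (adjusted.foldl
    (fun (acc : List (List Int) × Int) count =>
      (acc.1 ++ [PySem.List.slice seats (some acc.2) (some (acc.2 + count))], acc.2 + count))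
    ([], 0)).1

-- ===== PORT B =====
-- the while loop of Source B as structural recursion on rows_left (state: layout, start)
def dseLoop (seats : List Int) (rows_left : Int) (layout : List (List Int)) (start : Int) : List (List Int) :=
  if rows_left ≤ 0 then layout
  else
    let count : Int := -(PySem.Int.floordiv (start - (seats.length : Int)) rows_left)
    dseLoop seats (rows_left - 1)
      (layout ++ [PySem.List.slice seats (some start) (some (start + count))]) (start + count)
termination_by rows_left.toNat
decreasing_by omega

def divide_seats_evenly_alt (seats : List Int) (max_rows : Int) : List (List Int) :=
  dseLoop seats (min max_rows (seats.length : Int)) [] 0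

-- ===== PRECONDITION & SPEC =====
-- A raises ZeroDivisionError exactly when min(max_rows, len(seats)) == 0; Pre_ excludes those inputs.
def Pre_divide_seats_evenly (seats : List Int) (max_rows : Int) : Prop :=
  min max_rows (seats.length : Int) ≠ 0
instance (seats : List Int) (max_rows : Int) : Decidable (Pre_divide_seats_evenly seats max_rows) := by
  unfold Pre_divide_seats_evenly; infer_instance

def pvWitness_divide_seats_evenly : List Int × Int := ([10, 20, 30, 40, 50], 3)

-- When min(max_rows, len(seats)) == 0 A raises ZeroDivisionError; B returns [].
def Raises_divide_seats_evenly (seats : List Int) (max_rows : Int) : Prop :=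
  min max_rows (seats.length : Int) = 0
instance (seats : List Int) (max_rows : Int) : Decidable (Raises_divide_seats_evenly seats max_rows) := by
  unfold Raises_divide_seats_evenly; infer_instance
def pvRaiseWitness_divide_seats_evenly : List Int × Int := ([], 4)
def pvRaiseWitnessOut_divide_seats_evenly : List (List Int) := []

def Spec_divide_seats_evenly (seats : List Int) (max_rows : Int) (out : List (List Int)) : Prop :=
  out = divide_seats_evenly_alt seats max_rows
instance (seats : List Int) (max_rows : Int) (out : List (List Int)) : Decidable (Spec_divide_seats_evenly seats max_rows out) := by
  unfold Spec_divide_seats_evenly; infer_instance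

-- ===== CLAIM (what is proved, stated in full; the proofs are below) =====
def Claim_equal_divide_seats_evenly : Prop := ∀ (seats : List Int) (max_rows : Int), Dom_divide_seats_evenly seats max_rows → Pre_divide_seats_evenly seats max_rows → Spec_divide_seats_evenly seats max_rows (divide_seats_evenly seats max_rows)

def Claim_raises_divide_seats_evenly : Prop := (∀ (seats : List Int) (max_rows : Int), Dom_divide_seats_evenly seats max_rows → Raises_divide_seats_evenly seats max_rows → ¬ Pre_divide_seats_evenly seats max_rows) ∧ (Dom_divide_seats_evenly (pvRaiseWitness_divide_seats_evenly.1) (pvRaiseWitness_divide_seats_evenly.2) ∧ Raises_divide_seats_evenly (pvRaiseWitness_divide_seats_evenly.1) (pvRaiseWitness_divide_seats_evenly.2) ∧ divide_seats_evenly_alt (pvRaiseWitness_divide_seats_evenly.1) (pvRaiseWitness_divide_seats_evenly.2) = pvRaiseWitnessOut_divide_seats_evenly)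

-- ===== LEMMAS AND PROOFS =====

-- ceiling division on Nat
def cdiv (n r : Nat) : Nat := (n + r - 1) / r

-- the row sizes B's recursion produces
def countsL : Nat → Nat → List Nat
  | _, 0 => []
  | n, (r+1) => cdiv n (r+1) :: countsL (n - cdiv n (r+1)) r

-- chunking a list by a list of sizes
def chunks : List Int → List Nat → List (List Int)
  | _, [] => []
  | rest, c :: cs => rest.take c :: chunks (rest.drop c) cs

theorem ceil_cast (a r : Nat) (hr : 0 < r) :
    -(PySem.Int.floordiv (-(a:Int)) (r:Int)) = ((cdiv a r : Nat) : Int) := by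
  rw [PySem.Int.neg_floordiv_neg_eq_iff_of_pos (by exact_mod_cast hr)]
  unfold cdiv
  have h := Nat.div_add_mod (a + r - 1) r
  have h2 := Nat.mod_lt (a + r - 1) hr
  set q := (a + r - 1) / r
  set m := (a + r - 1) % r
  have hc : (r:Int) * (q:Int) + (m:Int) = (a:Int) + (r:Int) - 1 := by omega
  have hm0 : (0:Int) ≤ (m:Int) := by positivity
  have hmr : (m:Int) < (r:Int) := by exact_mod_cast h2
  constructor
  · nlinarith
  · nlinarith

theorem cdiv_le (m r : Nat) (hr : 0 < r) : cdiv m r ≤ m := by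
  have h1 : m ≤ r * m := Nat.le_mul_of_pos_left m hr
  have h2 := Nat.div_add_mod (m + r - 1) r
  have h3 := Nat.mod_lt (m + r - 1) hr
  unfold cdiv
  by_contra hlt
  push Not at hlt
  have h4 : r * (m + 1) ≤ r * ((m + r - 1) / r) := Nat.mul_le_mul_left r hlt
  have h5 : r * (m + 1) = r * m + r := by ring
  omega

theorem dseLoop_eq_chunks (seats : List Int) : ∀ (r : Nat) (s : Nat) (layout : List (List Int)),
    s ≤ seats.length →
    dseLoop seats (r : Int) layout (s : Int)
      = layout ++ chunks (seats.drop s) (countsL (seats.length - s) r) := by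
  intro r
  induction r with
  | zero => intro s layout _; rw [dseLoop]; simp [countsL, chunks]
  | succ r ih =>
    intro s layout hs
    rw [dseLoop, if_neg (by push_cast; omega)]
    have hsub : (s:Int) - (seats.length : Int) = -(((seats.length - s : Nat)) : Int) := by omega
    rw [hsub, ceil_cast (seats.length - s) (r+1) (by omega)]
    dsimp only
    rw [PySem.List.slice_natCast_add]
    set c := cdiv (seats.length - s) (r+1) with hcdef
    have hcle : c ≤ seats.length - s := cdiv_le _ _ (by omega)
    rw [show (s:Int) + (c:Int) = ((s + c : Nat) : Int) by push_cast; ring,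
        show ((r+1:Nat) : Int) - 1 = ((r:Nat) : Int) by push_cast; ring]
    rw [ih (s + c) _ (by omega)]
    rw [show seats.length - (s + c) = (seats.length - s) - c by omega]
    rw [show countsL (seats.length - s) (r+1) = c :: countsL ((seats.length - s) - c) r from rfl]
    rw [show chunks (seats.drop s) (c :: countsL ((seats.length - s) - c) r)
          = (seats.drop s).take c :: chunks ((seats.drop s).drop c) (countsL ((seats.length - s) - c) r) from rfl]
    rw [show (seats.drop s).drop c = seats.drop (s + c) by rw [List.drop_drop]]
    simp

theorem cdiv_char (n r : Nat) (hr : 0 < r) :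
    cdiv n r = n / r + (if n % r = 0 then 0 else 1) := by
  have hd := Nat.div_add_mod n r
  have hm := Nat.mod_lt n hr
  set b := n / r
  set m := n % r
  unfold cdiv
  by_cases h : m = 0
  · rw [if_pos h]
    have hn : n + r - 1 = r * b + (r - 1) := by omega
    rw [hn, Nat.mul_add_div hr, Nat.div_eq_of_lt (by omega)]
  · rw [if_neg h]
    have hn : n + r - 1 = r * (b + 1) + (m - 1) := by
      have : r * (b + 1) = r * b + r := by ring
      omega
    rw [hn, Nat.mul_add_div hr, Nat.div_eq_of_lt (by omega)]

theorem countsL_closed_succ (r : Nat) : ∀ n,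
    countsL n (r+1) = List.replicate (n % (r+1)) (n / (r+1) + 1) ++ List.replicate ((r+1) - n % (r+1)) (n / (r+1)) := by
  induction r with
  | zero =>
    intro n
    simp [countsL, cdiv, Nat.mod_one, List.replicate_succ]
  | succ r ih =>
    intro n
    have hd := Nat.div_add_mod n (r+2)
    have hm := Nat.mod_lt n (show 0 < r+2 by omega)
    set b := n / (r+2) with hbdef
    set m := n % (r+2) with hmdef
    have hc := cdiv_char n (r+2) (by omega)
    rw [show countsL n (r+2) = cdiv n (r+2) :: countsL (n - cdiv n (r+2)) (r+1) from rfl, hc]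
    by_cases h : m = 0
    · rw [if_pos (by rw [← hmdef]; exact h)] at hc ⊢
      have hn' : n - (b + 0) = (r+1) * b := by
        have : (r+2) * b = (r+1) * b + b := by ring
        omega
      rw [hn', ih ((r+1) * b)]
      rw [Nat.mul_mod_right, Nat.mul_div_cancel_left b (show 0 < r+1 by omega), ← hbdef]
      simp [h, List.replicate_succ]
    · rw [if_neg (by rw [← hmdef]; exact h)] at hc ⊢
      have hn' : n - (b + 1) = (r+1) * b + (m - 1) := by
        have : (r+2) * b = (r+1) * b + b := by ring
        omega
      rw [hn', ih ((r+1) * b + (m - 1))]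
      rw [Nat.mul_add_mod, Nat.mod_eq_of_lt (show m - 1 < r+1 by omega),
          Nat.mul_add_div (show 0 < r+1 by omega), Nat.div_eq_of_lt (show m - 1 < r+1 by omega)]
      have hms : m = (m - 1) + 1 := by omega
      rw [← hbdef, show (r+2) - m = (r+1) - (m-1) by omega, hms, List.replicate_succ]
      simp

theorem pySetD_neg_natCast' {α : Type} (xs : List α) (k : Nat) (v : α) (h1 : 0 < k) (h2 : k ≤ xs.length) :
    PySem.List.pySetD xs (-(k:Int)) v = xs.set (xs.length - k) v := by
  simp only [PySem.List.pySetD, PySem.List.pySet?, PySem.List.pyIdx?]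
  rw [if_neg (by omega), if_pos (by omega)]
  simp

theorem adjust_fold (r : Nat) (c : Int) : ∀ e : Nat, e ≤ r →
    (PySem.List.pyRange 0 (e:Int) 1).foldl
      (fun l i => PySem.List.pySetD l (-(i+1)) (PySem.List.pyGetD l (-(i+1)) 0 - 1))
      (List.replicate r c)
    = List.replicate (r-e) c ++ List.replicate e (c-1) := by
  intro e
  induction e with
  | zero => intro _; simp [PySem.List.pyRange_one_eq_nil]
  | succ e ih =>
    intro he
    have hcast : ((e+1:Nat):Int) = (e:Int) + 1 := by push_cast; ring
    rw [hcast, PySem.List.pyRange_one_succ_right (by positivity), List.foldl_append,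
        ih (by omega)]
    simp only [List.foldl_cons, List.foldl_nil]
    set L := List.replicate (r-e) c ++ List.replicate e (c-1) with hLdef
    have hL : L.length = r := by simp [hLdef]; omega
    have hneg : -((e:Int)+1) = -((e+1:Nat):Int) := by push_cast; ring
    rw [hneg, PySem.List.pyGetD_neg_natCast L (e+1) 0 (by omega) (by omega),
        pySetD_neg_natCast' L (e+1) _ (by omega) (by omega)]
    have hget : L[L.length - (e+1)]'(by omega) = c := by
      rw [List.getElem_eq_iff, hLdef]
      rw [List.getElem?_append_left (by simp; omega)]
      simp [List.getElem?_replicate]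
      omega
    rw [hget, hL]
    rw [hLdef, show r - e = (r - (e+1)) + 1 by omega, List.replicate_succ']
    rw [List.append_assoc, List.set_append]
    rw [if_neg (by simp)]
    simp [List.replicate_succ]

theorem slice_fold (seats : List Int) : ∀ (cs : List Nat) (acc : List (List Int)) (s : Nat),
    ((cs.map (Int.ofNat)).foldl
      (fun (acc : List (List Int) × Int) count =>
        (acc.1 ++ [PySem.List.slice seats (some acc.2) (some (acc.2 + count))], acc.2 + count))
      (acc, (s:Int))).1 = acc ++ chunks (seats.drop s) cs := by
  intro cs
  induction cs with
  | nil => intro acc s; simp [chunks]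
  | cons c cs ih =>
    intro acc s
    rw [List.map_cons, List.foldl_cons]
    simp only [Int.ofNat_eq_natCast]
    rw [PySem.List.slice_natCast_add]
    rw [show (s:Int) + (c:Int) = ((s+c : Nat):Int) by push_cast; ring]
    rw [ih]
    rw [show chunks (seats.drop s) (c :: cs) = (seats.drop s).take c :: chunks ((seats.drop s).drop c) cs from rfl]
    rw [show (seats.drop s).drop c = seats.drop (s + c) by rw [List.drop_drop]]
    simp

-- ===== VERDICT (by name: the statement is the Claim_ definition above) =====
theorem divide_seats_evenly_spec : Claim_equal_divide_seats_evenly := by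
  intro seats max_rows _ hpre
  unfold Spec_divide_seats_evenly divide_seats_evenly divide_seats_evenly_alt
  unfold Pre_divide_seats_evenly at hpre
  simp only []
  set n := seats.length with hn
  set rows : Int := min max_rows (n:Int) with hrows
  rcases lt_trichotomy rows 0 with hneg | hzero | hpos
  · -- rows < 0 : both sides are []
    have h0 : rows.toNat = 0 := by omega
    have hB0 : dseLoop seats rows [] 0 = [] := by
      rw [dseLoop]; exact if_pos (le_of_lt hneg)
    rw [hB0, h0]
    simp
  · exact absurd hzero hpre
  · -- rows > 0
    have hrn : rows ≤ (n:Int) := by rw [hrows]; exact min_le_right _ _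
    set r := rows.toNat with hrdef
    have hri : (r:Int) = rows := by omega
    have hr1 : 1 ≤ r := by omega
    have hrn' : r ≤ n := by omega
    have hceil : -(PySem.Int.floordiv (-(n:Int)) rows) = ((cdiv n r : Nat) : Int) := by
      rw [← hri]; exact ceil_cast n r (by omega)
    rw [hceil]
    have hsum : (List.replicate r ((cdiv n r : Nat) : Int)).sum = ((r * cdiv n r : Nat) : Int) := by
      rw [List.sum_replicate, nsmul_eq_mul]; push_cast; ring
    rw [hsum]
    have hd := Nat.div_add_mod n r
    have hmlt := Nat.mod_lt n (show 0 < r by omega)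
    set b := n / r with hbdef
    set m := n % r with hmdef
    have hc := cdiv_char n r (by omega)
    rw [← hbdef, ← hmdef] at hc
    have hclosed : countsL n r = List.replicate m (b+1) ++ List.replicate (r - m) b := by
      rw [show r = (r-1)+1 by omega, countsL_closed_succ (r-1) n,
          show (r-1)+1 = r by omega, ← hbdef, ← hmdef]
    -- B side
    have hB : dseLoop seats rows [] 0 = chunks seats (countsL n r) := by
      rw [← hri, show (0:Int) = ((0:Nat):Int) from rfl, dseLoop_eq_chunks seats r 0 [] (by omega)]
      simp [← hn]
    rw [hB]
    by_cases h : m = 0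
    · -- exact division: no adjustment pass runs
      have hrb : r * cdiv n r = n := by
        rw [hc, if_pos h]
        have : r * (b + 0) = r * b := by ring
        omega
      rw [if_neg (by rw [hrb]; omega)]
      have hspr : List.replicate r ((cdiv n r : Nat) : Int) = (countsL n r).map Int.ofNat := by
        rw [hclosed, hc, if_pos h, h]
        simp
      rw [hspr]
      have := slice_fold seats (countsL n r) [] 0
      simp only [List.drop_zero, List.nil_append, Nat.cast_zero] at this
      exact this
    · -- inexact division: the tail-decrement pass runs for r - m steps
      have hrb : r * cdiv n r = n + (r - m) := by
        rw [hc, if_neg h]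
        have : r * (b + 1) = r * b + r := by ring
        omega
      rw [if_pos (by rw [hrb]; omega)]
      have hdiff : ((r * cdiv n r : Nat) : Int) - (n:Int) = (((r - m : Nat)) : Int) := by
        rw [hrb]; omega
      rw [hdiff, adjust_fold r _ (r - m) (by omega)]
      have hspr : List.replicate (r-(r-m)) ((cdiv n r : Nat) : Int) ++ List.replicate (r-m) (((cdiv n r : Nat) : Int) - 1)
          = (countsL n r).map Int.ofNat := by
        rw [hclosed, hc, if_neg h, show r - (r - m) = m by omega]
        simp only [List.map_append, List.map_replicate, Int.ofNat_eq_natCast]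
        rw [show ((b+1:Nat):Int) - 1 = (b:Int) by push_cast; ring]
      rw [hspr]
      have := slice_fold seats (countsL n r) [] 0
      simp only [List.drop_zero, List.nil_append, Nat.cast_zero] at this
      exact this

@[simp] theorem divide_seats_evenly_raises : Claim_raises_divide_seats_evenly := by
  unfold Claim_raises_divide_seats_evenly
  refine ⟨fun seats max_rows _ h hp => hp h, by decide, by decide, ?_⟩
  show divide_seats_evenly_alt [] 4 = []
  rw [divide_seats_evenly_alt, dseLoop]
  simp
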